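-- pv_equiv track=rewrite | github.com/ubisoft/ubisoft-laforge-toxbuster | src/Evaluation/EvalMetric.py | collapse_labels
-- ===== SOURCE A (Python) =====
-- from typing import Dict, List, Tuple, Union
--
-- def collapse_labels(labels: List[int],
--                     first_toxic_label: int = 1) -> List[Tuple[int, str]]:
--     '''
--     Collapses labels based on the following:
--         Toxic_label, "text"
--
--     Parameter:
--     ---------
--     labels: List[int]
--         The labels to be converted
--     first_toxic_label: int
--         The first toxic label. Defaults to 1.
--
--     Example:
--     >>> labels = [0, 1, 2, 1, 1]
--     >>> collapse_labels([0, 1, 2, 1, 1])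
--     [(1, ' b'), (2, ' c'), (1, ' d e')]
--     '''
--
--     if (len(labels) == 0):
--         return []
--
--     result = []
--     prev_label = labels[0]
--     text = f"{chr(97)}"
--
--     for i in range(1, len(labels)):
--
--         label = labels[i]
--         if label != prev_label:
--             if (prev_label >= first_toxic_label):
--                 result.append((prev_label, text))
--
--             prev_label = label
--             text = ""
--
--         text += f" {chr(i + 97)}"
--
--     if (prev_label >= first_toxic_label):
--         result.append((prev_label, text))
--     return result
-- ===== SOURCE B (Python) =====
-- from typing import Dict, List, Tuple, Union
--
-- def collapse_labels(labels: List[int],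
--                     first_toxic_label: int = 1) -> List[Tuple[int, str]]:
--     # Pass 1: group the labels into runs of equal consecutive values.
--     runs = []
--     i, n = 0, len(labels)
--     while i < n:
--         j = i + 1
--         while j < n and labels[j] == labels[i]:
--             j += 1
--         runs.append((labels[i], j - i))
--         i = j
--     # Pass 2: build one (label, text) pair per toxic run from absolute indices.
--     result = []
--     start = 0
--     for label, length in runs:
--         if label >= first_toxic_label:
--             result.append((label, "".join(
--                 chr(97) if k == 0 else " " + chr(k + 97)
--                 for k in range(start, start + length))))
--         start += length
--     return result
-- ===== Notes on version B (the rewrite author's own statement) =====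
-- stated objective: alternative
-- what changed: A's single interleaved state machine (one pass mutating result/prev_label/text per token) is replaced by a two-pass decomposition: first group the labels into runs of equal consecutive values, then build each toxic run's text independently from its absolute index range.
import Mathlib
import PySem

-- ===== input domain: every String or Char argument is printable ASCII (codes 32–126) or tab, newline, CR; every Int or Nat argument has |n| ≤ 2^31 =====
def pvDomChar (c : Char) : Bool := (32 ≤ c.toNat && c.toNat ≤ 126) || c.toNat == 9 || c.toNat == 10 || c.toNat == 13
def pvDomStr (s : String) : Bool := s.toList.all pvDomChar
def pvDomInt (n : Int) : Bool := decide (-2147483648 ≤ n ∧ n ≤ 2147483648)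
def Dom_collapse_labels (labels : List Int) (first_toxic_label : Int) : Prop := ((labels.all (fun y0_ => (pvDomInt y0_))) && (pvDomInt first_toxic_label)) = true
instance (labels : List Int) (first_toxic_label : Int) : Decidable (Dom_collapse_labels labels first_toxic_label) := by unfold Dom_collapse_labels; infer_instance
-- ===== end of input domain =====

-- B replaces A's single interleaved state machine by a group-into-runs pass followed by a
-- per-run text-building pass (objective: alternative decomposition, same cost).

-- ===== PORT A =====
-- the loop body of A's 'for i in range(1, len(labels))'; text is carried as List Char (built char-append-wise, as Python does)
def stepA (first_toxic_label : Int) (labels : List Int)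
    (st : List (Int × String) × Int × List Char) (i : Int) : List (Int × String) × Int × List Char :=
  let label := PySem.List.pyGetD labels i 0   -- labels[i]; i always in range here
  let st :=
    if label ≠ st.2.1 then
      ((if st.2.1 ≥ first_toxic_label then st.1 ++ [(st.2.1, String.ofList st.2.2)] else st.1),
       label, ([] : List Char))
    else st
  (st.1, st.2.1, st.2.2 ++ [' ', Char.ofNat (i.toNat + 97)])   -- text += f" {chr(i + 97)}"

def collapse_labels (labels : List Int) (first_toxic_label : Int) : List (Int × String) :=
  if labels.length = 0 then []
  else
    let st := (PySem.List.pyRange 1 (labels.length : Int) 1).foldl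
      (stepA first_toxic_label labels)
      ([], PySem.List.pyGetD labels 0 0, [Char.ofNat 97])
    if st.2.1 ≥ first_toxic_label then st.1 ++ [(st.2.1, String.ofList st.2.2)] else st.1

-- ===== PORT B =====
-- the token the join-comprehension contributes for absolute index k
def tokB (k : Nat) : List Char :=
  if k = 0 then [Char.ofNat 97] else [' ', Char.ofNat (k + 97)]

-- the text "".join(tok(k) for k in range(start, start + len))
def runText (start len : Nat) : List Char :=
  ((List.range len).map (fun k => tokB (start + k))).flatten

-- pass 1: the index while-loop over [i, n) transcribed as structural recursion on the suffix
-- (the inner 'while j < n and labels[j] == labels[i]' scan is the takeWhile)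
def runsOf : List Int → List (Int × Nat)
  | [] => []
  | l :: rest =>
      (l, (rest.takeWhile (· == l)).length + 1) :: runsOf (rest.dropWhile (· == l))
  termination_by xs => xs.length
  decreasing_by
    simpa [Nat.lt_succ_iff] using List.length_dropWhile_le (· == l) rest

-- pass 2: fold over the runs carrying (result, start)
def collapse_labels_alt (labels : List Int) (first_toxic_label : Int) : List (Int × String) :=
  ((runsOf labels).foldl
    (fun (st : List (Int × String) × Nat) r =>
      ((if r.1 ≥ first_toxic_label then st.1 ++ [(r.1, String.ofList (runText st.2 r.2))] else st.1),
       st.2 + r.2))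
    ([], 0)).1

-- ===== PRECONDITION & SPEC =====
def Spec_collapse_labels (labels : List Int) (first_toxic_label : Int) (out : List (Int × String)) : Prop := out = collapse_labels_alt labels first_toxic_label
instance (labels : List Int) (first_toxic_label : Int) (out : List (Int × String)) : Decidable (Spec_collapse_labels labels first_toxic_label out) := by unfold Spec_collapse_labels; infer_instance

-- ===== CLAIM (what is proved, stated in full; the proofs are below) =====
def Claim_equal_collapse_labels : Prop := ∀ (labels : List Int) (first_toxic_label : Int), Dom_collapse_labels labels first_toxic_label → Spec_collapse_labels labels first_toxic_label (collapse_labels labels first_toxic_label)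

-- ===== LEMMAS AND PROOFS =====

-- element-wise characterisation of A's loop (state machine on the remaining suffix)
def go (ftl prev : Int) (t : List Char) (p : Nat) : List Int → List (Int × String)
  | [] => if prev ≥ ftl then [(prev, String.ofList t)] else []
  | l :: rest =>
      if l ≠ prev then
        (if prev ≥ ftl then [(prev, String.ofList t)] else [])
          ++ go ftl l [' ', Char.ofNat (p + 97)] (p + 1) rest
      else go ftl prev (t ++ [' ', Char.ofNat (p + 97)]) (p + 1) rest

-- run-wise characterisation of B's second pass
def expand (ftl : Int) (start : Nat) : List (Int × Nat) → List (Int × String)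
  | [] => []
  | (l, c) :: rl =>
      (if l ≥ ftl then [(l, String.ofList (runText start c))] else []) ++ expand ftl (start + c) rl

lemma runText_succ (p n : Nat) :
    runText p (n + 1) = tokB p ++ runText (p + 1) n := by
  unfold runText
  rw [List.range_succ_eq_map]
  simp only [List.map_cons, List.flatten_cons, List.map_map, Nat.add_zero]
  congr 2
  refine List.map_congr_left ?_
  intro k _
  simp only [Function.comp_apply]
  congr 1
  omega

lemma runsOf_nil : runsOf [] = [] := by rw [runsOf.eq_def]

lemma runsOf_cons (l : Int) (rest : List Int) :
    runsOf (l :: rest)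
    = (l, (rest.takeWhile (· == l)).length + 1) :: runsOf (rest.dropWhile (· == l)) := by
  rw [runsOf.eq_def]

lemma runText_zero (p : Nat) : runText p 0 = [] := by simp [runText]

lemma B_inv (ftl : Int) :
    ∀ (rl : List (Int × Nat)) (res : List (Int × String)) (start : Nat),
    (rl.foldl
      (fun (st : List (Int × String) × Nat) r =>
        ((if r.1 ≥ ftl then st.1 ++ [(r.1, String.ofList (runText st.2 r.2))] else st.1),
         st.2 + r.2))
      (res, start)).1 = res ++ expand ftl start rl := by
  intro rl
  induction rl with
  | nil => intro res start; simp [expand]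
  | cons r rl ih =>
      intro res start
      obtain ⟨l, c⟩ := r
      simp only [List.foldl_cons, expand, ih]
      by_cases h : l ≥ ftl <;> simp [h]

lemma A_loop (ftl : Int) (xs : List Int) :
    ∀ (k a : Nat), a + k = xs.length → 1 ≤ a →
    ∀ (res : List (Int × String)) (prev : Int) (t : List Char),
    (let st := (PySem.List.pyRange (a : Int) (xs.length : Int) 1).foldl
        (stepA ftl xs) (res, prev, t);
     if st.2.1 ≥ ftl then st.1 ++ [(st.2.1, String.ofList st.2.2)] else st.1)
    = res ++ go ftl prev t a (xs.drop a) := by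
  intro k
  induction k with
  | zero =>
      intro a ha _ res prev t
      have h1 : (xs.length : Int) ≤ (a : Int) := by omega
      have h2 : xs.drop a = [] := List.drop_eq_nil_of_le (by omega)
      simp only [PySem.List.pyRange_one_eq_nil h1, h2, go, List.foldl_nil]
      split <;> simp
  | succ k ih =>
      intro a ha hp res prev t
      have hlt : a < xs.length := by omega
      have hcons : PySem.List.pyRange (a : Int) (xs.length : Int) 1
          = (a : Int) :: PySem.List.pyRange ((a : Int) + 1) (xs.length : Int) 1 :=
        PySem.List.pyRange_one_cons (by exact_mod_cast hlt)
      have hdrop : xs.drop a = xs[a] :: xs.drop (a + 1) :=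
        (List.drop_eq_getElem_cons hlt)
      have hcast : ((a : Int) + 1) = ((a + 1 : Nat) : Int) := by push_cast; ring
      have hstep : stepA ftl xs (res, prev, t) (a : Int)
          = (if xs[a] ≠ prev then
               ((if prev ≥ ftl then res ++ [(prev, String.ofList t)] else res),
                xs[a], ([' ', Char.ofNat (a + 97)] : List Char))
             else (res, prev, t ++ [' ', Char.ofNat (a + 97)])) := by
        simp only [stepA, PySem.List.pyGetD_natCast, Int.toNat_natCast]
        have : xs.getD a 0 = xs[a] := List.getD_eq_getElem xs 0 hlt
        rw [this]
        by_cases h : xs[a] ≠ prev <;> simp [h]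
      simp only [hcons, List.foldl_cons, hstep, hdrop, go]
      by_cases h : xs[a] ≠ prev
      · simp only [if_pos h, hcast]
        rw [ih (a + 1) (by omega) (by omega)]
        by_cases h2 : prev ≥ ftl <;> simp [h2]
      · simp only [if_neg h, hcast]
        rw [ih (a + 1) (by omega) (by omega)]

-- bridge: the state machine, grouped run by run
lemma go_runs (ftl : Int) :
    ∀ (rest : List Int) (l : Int) (t : List Char) (p : Nat), 0 < p →
    go ftl l t p rest
    = (if l ≥ ftl then [(l, String.ofList (t ++ runText p (rest.takeWhile (· == l)).length))] else [])
      ++ expand ftl (p + (rest.takeWhile (· == l)).length) (runsOf (rest.dropWhile (· == l))) := by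
  intro rest
  induction rest with
  | nil =>
      intro l t p _
      simp [go, runText, runsOf_nil, expand]
  | cons x r ih =>
      intro l t p hp
      have htok : tokB p = [' ', Char.ofNat (p + 97)] := by
        simp [tokB, Nat.pos_iff_ne_zero.mp hp]
      by_cases h : x = l
      · subst h
        have hgo : go ftl x t p (x :: r)
            = go ftl x (t ++ [' ', Char.ofNat (p + 97)]) (p + 1) r := by
          simp [go]
        rw [hgo, ih x (t ++ [' ', Char.ofNat (p + 97)]) (p + 1) (by omega)]
        simp only [List.takeWhile_cons, beq_self_eq_true, if_true, List.dropWhile_cons,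
          List.length_cons]
        rw [runText_succ, htok]
        have harith : p + ((List.takeWhile (fun y => y == x) r).length + 1)
            = p + 1 + (List.takeWhile (fun y => y == x) r).length := by omega
        rw [harith, List.append_assoc]
      · have hne : (x == l) = false := by simp [h]
        have hgo : go ftl l t p (x :: r)
            = (if l ≥ ftl then [(l, String.ofList t)] else [])
              ++ go ftl x [' ', Char.ofNat (p + 97)] (p + 1) r := by
          simp [go, h]
        rw [hgo, ih x [' ', Char.ofNat (p + 97)] (p + 1) (by omega)]
        simp only [List.takeWhile_cons, hne, Bool.false_eq_true, if_false, List.dropWhile_cons, List.length_nil]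
        rw [runsOf_cons]
        simp only [expand, runText_succ, runText_zero, htok, Nat.add_zero, List.append_nil]
        have harith : p + ((List.takeWhile (fun y => y == x) r).length + 1)
            = p + 1 + (List.takeWhile (fun y => y == x) r).length := by omega
        rw [harith]

-- ===== VERDICT (by name: the statement is the Claim_ definition above) =====
theorem collapse_labels_spec : Claim_equal_collapse_labels := by
  intro labels ftl _
  unfold Spec_collapse_labels
  cases labels with
  | nil => simp [collapse_labels, collapse_labels_alt, runsOf_nil]
  | cons l rest =>
      have hB : collapse_labels_alt (l :: rest) ftl = expand ftl 0 (runsOf (l :: rest)) := by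
        unfold collapse_labels_alt
        rw [B_inv ftl (runsOf (l :: rest)) [] 0]
        simp
      have hA : collapse_labels (l :: rest) ftl = go ftl l [Char.ofNat 97] 1 rest := by
        unfold collapse_labels
        rw [if_neg (by simp)]
        have h := A_loop ftl (l :: rest) rest.length 1 (by simp [Nat.add_comm]) (le_refl 1) [] l [Char.ofNat 97]
        simpa [PySem.List.pyGetD_zero_cons] using h
      rw [hA, hB, go_runs ftl rest l [Char.ofNat 97] 1 (by omega), runsOf_cons]
      simp only [expand, runText_succ]
      have htok0 : tokB 0 = [Char.ofNat 97] := by simp [tokB]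
      rw [htok0]
      have h2 : 0 + ((rest.takeWhile (· == l)).length + 1)
          = 1 + (rest.takeWhile (· == l)).length := by omega
      rw [h2]
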